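-- pv_equiv track=rewrite | github.com/MyMindSpace/meditation_MVP | Core_engine/meditation_recommender.py | _find_catalog_entry
-- ===== SOURCE A (Python) =====
-- from typing import Dict, Any, List, Optional
--
-- def _find_catalog_entry(catalog: List[Dict[str, str]], name: str) -> Optional[Dict[str, str]]:
--     if not name:
--         return None
--     name_norm = name.strip().lower()
--     for e in catalog:
--         if e.get('Name', '').strip().lower() == name_norm:
--             return e
--     # try partial match
--     for e in catalog:
--         if name_norm in e.get('Name', '').strip().lower():
--             return e
--     return None
-- ===== SOURCE B (Python) =====
-- from typing import Dict, Any, List, Optional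
--
-- def _find_catalog_entry(catalog, name):
--     if not name:
--         return None
--     name_norm = name.strip().lower()
--     partial = None
--     for e in catalog:
--         nm = e.get('Name', '').strip().lower()
--         if nm == name_norm:
--             return e
--         if partial is None and name_norm in nm:
--             partial = e
--     return partial
-- ===== Notes on version B (the rewrite author's own statement) =====
-- stated objective: simpler
-- what changed: Replaces A's two full scans (exact pass, then partial pass) with one single pass that returns on an exact match and remembers the first partial match as a fallback.
import Mathlib
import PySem

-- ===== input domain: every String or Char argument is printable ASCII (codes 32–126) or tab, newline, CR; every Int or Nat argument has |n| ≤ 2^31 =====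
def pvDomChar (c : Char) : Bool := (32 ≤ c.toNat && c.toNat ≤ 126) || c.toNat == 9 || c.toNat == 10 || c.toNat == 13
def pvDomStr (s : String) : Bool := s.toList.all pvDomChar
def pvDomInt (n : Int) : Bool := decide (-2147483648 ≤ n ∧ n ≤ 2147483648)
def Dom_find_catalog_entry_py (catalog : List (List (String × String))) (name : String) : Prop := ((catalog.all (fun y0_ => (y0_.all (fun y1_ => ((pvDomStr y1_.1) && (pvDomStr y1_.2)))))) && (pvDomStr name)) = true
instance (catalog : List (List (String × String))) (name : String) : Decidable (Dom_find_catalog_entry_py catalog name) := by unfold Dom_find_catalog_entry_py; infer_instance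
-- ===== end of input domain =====

-- B changes A's two full scans into one single pass with a first-partial fallback (objective: simpler).

-- shared normalization: e.get('Name','').strip().lower() — identical expression in both Pythons
def pvEName (e : List (String × String)) : String :=
  PySem.Str.lower (PySem.Str.strip (PySem.Dict.getD (PySem.Dict.mk e) "Name" ""))

-- ===== PORT A =====
def find_catalog_entry_py (catalog : List (List (String × String))) (name : String) : Option (List (String × String)) :=
  if name = "" then none
  else
    let name_norm := PySem.Str.lower (PySem.Str.strip name)
    match catalog.find? (fun e => pvEName e == name_norm) with
    | some e => some e
    | none => catalog.find? (fun e => PySem.Str.isIn name_norm (pvEName e))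

-- ===== PORT B =====
def pvAltLoop (name_norm : String) : List (List (String × String)) → Option (List (String × String)) → Option (List (String × String))
  | [], partialMatch => partialMatch
  | e :: rest, partialMatch =>
      let nm := pvEName e
      if nm == name_norm then some e
      else if partialMatch == none && PySem.Str.isIn name_norm nm then
        pvAltLoop name_norm rest (some e)
      else
        pvAltLoop name_norm rest partialMatch

def find_catalog_entry_py_alt (catalog : List (List (String × String))) (name : String) : Option (List (String × String)) :=
  if name = "" then none
  else pvAltLoop (PySem.Str.lower (PySem.Str.strip name)) catalog none

-- ===== PRECONDITION & SPEC =====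
def Spec_find_catalog_entry_py (catalog : List (List (String × String))) (name : String) (out : Option (List (String × String))) : Prop := out = find_catalog_entry_py_alt catalog name
instance (catalog : List (List (String × String))) (name : String) (out : Option (List (String × String))) : Decidable (Spec_find_catalog_entry_py catalog name out) := by unfold Spec_find_catalog_entry_py; infer_instance

-- ===== CLAIM (what is proved, stated in full; the proofs are below) =====
def Claim_equal_find_catalog_entry_py : Prop := ∀ (catalog : List (List (String × String))) (name : String), Dom_find_catalog_entry_py catalog name → Spec_find_catalog_entry_py catalog name (find_catalog_entry_py catalog name)

-- ===== LEMMAS AND PROOFS =====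

-- loop invariant: the single pass equals "first exact match, else accumulator, else first partial match"
lemma pvAltLoop_eq (nn : String) (cat : List (List (String × String)))
    (acc : Option (List (String × String))) :
    pvAltLoop nn cat acc =
      match cat.find? (fun e => pvEName e == nn) with
      | some e => some e
      | none => acc.orElse (fun _ => cat.find? (fun e => PySem.Str.isIn nn (pvEName e))) := by
  induction cat generalizing acc with
  | nil => cases acc <;> simp [pvAltLoop, Option.orElse]
  | cons e rest ih =>
    simp only [pvAltLoop, List.find?]
    by_cases hx : pvEName e == nn
    · simp [hx]
    · simp only [hx, Bool.false_eq_true, if_false]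
      cases acc with
      | some a => simp [ih, Option.orElse]
      | none =>
        by_cases hp : PySem.Chars.isIn nn.toList (pvEName e).toList = true
        · simp [hp, ih, Option.orElse]
        · simp [hp, ih, Option.orElse]

-- ===== VERDICT (by name: the statement is the Claim_ definition above) =====
theorem find_catalog_entry_py_spec : Claim_equal_find_catalog_entry_py := by
  intro catalog name _
  unfold Spec_find_catalog_entry_py find_catalog_entry_py find_catalog_entry_py_alt
  by_cases h : name = ""
  · simp [h]
  · simp only [h, if_false]
    rw [pvAltLoop_eq]
    cases hf : catalog.find? (fun e => pvEName e == PySem.Str.lower (PySem.Str.strip name)) <;>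
      simp [Option.orElse]
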